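-- pv_equiv track=rewrite | github.com/SDSU-CompE-561-Fall-2025/aztec-list | backend/src/app/core/moderation.py | _normalize_evasion
-- ===== SOURCE A (Python) =====
-- def _normalize_evasion(text: str) -> str:
--     """
--     Normalize common evasion techniques.
--
--     Handles leet speak (c0caine), spacing (g u n s), and special characters.
--
--     Args:
--         text: Input text to normalize
--
--     Returns:
--         str: Normalized text with evasion patterns converted to standard form
--     """
--     # Convert to lowercase first
--     text = text.lower()
--
--     # Common leet speak substitutions
--     leet_map = {
--         "0": "o",
--         "1": "i",
--         "3": "e",
--         "4": "a",
--         "5": "s",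
--         "7": "t",
--         "8": "b",
--         "9": "g",
--         "@": "a",
--         "$": "s",
--     }
--     for leet, normal in leet_map.items():
--         text = text.replace(leet, normal)
--
--     # Remove common separator characters (but keep regular spaces for now)
--     text = text.replace("_", "").replace("-", "").replace(".", "")
--
--     # Remove excessive spaces (more than one space becomes one space)
--     return " ".join(text.split())
-- ===== SOURCE B (Python) =====
-- _LEET = {"0": "o", "1": "i", "3": "e", "4": "a", "5": "s",
--          "7": "t", "8": "b", "9": "g", "@": "a", "$": "s"}
--
--
-- def _normalize_evasion(text: str) -> str:
--     # One character-level state machine: substitute leet, drop separators,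
--     # and collapse/trim whitespace in the same single pass.
--     out = []
--     pending = False
--     for ch in text.lower():
--         if ch in "_-.":
--             continue
--         ch = _LEET.get(ch, ch)
--         if ch.isspace():
--             pending = True
--             continue
--         if pending and out:
--             out.append(" ")
--         out.append(ch)
--         pending = False
--     return "".join(out)
-- ===== Notes on version B (the rewrite author's own statement) =====
-- stated objective: alternative
-- what changed: Replaces A's staged pipeline (13 sequential full-string replace scans, then split(), then join) with a single character-level state machine: one loop over the text with an output accumulator and a pending-space flag that substitutes leet characters, drops separators and collapses/trims whitespace all in the same pass.
import Mathlib
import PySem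

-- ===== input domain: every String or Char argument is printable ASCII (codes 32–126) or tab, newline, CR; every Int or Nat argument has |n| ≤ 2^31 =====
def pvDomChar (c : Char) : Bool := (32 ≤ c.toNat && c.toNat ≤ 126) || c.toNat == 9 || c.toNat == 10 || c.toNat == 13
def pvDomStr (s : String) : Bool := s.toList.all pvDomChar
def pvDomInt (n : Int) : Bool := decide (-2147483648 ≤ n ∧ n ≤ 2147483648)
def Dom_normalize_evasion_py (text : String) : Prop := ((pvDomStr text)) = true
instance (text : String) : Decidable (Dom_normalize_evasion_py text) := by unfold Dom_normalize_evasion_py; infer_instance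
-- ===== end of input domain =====

-- B replaces A's staged passes (13 full-string replaces, then split, then join) by one
-- character-level state machine that substitutes, deletes and collapses whitespace in a
-- single pass with an accumulator and a pending-space flag; same return value.

-- ===== PORT A =====
def normalize_evasion_py (text : String) : String :=
  let text := PySem.Str.lower text
  let text := PySem.Str.replace text "0" "o"
  let text := PySem.Str.replace text "1" "i"
  let text := PySem.Str.replace text "3" "e"
  let text := PySem.Str.replace text "4" "a"
  let text := PySem.Str.replace text "5" "s"
  let text := PySem.Str.replace text "7" "t"
  let text := PySem.Str.replace text "8" "b"
  let text := PySem.Str.replace text "9" "g"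
  let text := PySem.Str.replace text "@" "a"
  let text := PySem.Str.replace text "$" "s"
  let text := PySem.Str.replace (PySem.Str.replace (PySem.Str.replace text "_" "") "-" "") "." ""
  PySem.Str.join " " (PySem.Str.split₀ text)

-- ===== PORT B =====
-- the _LEET dict of Source B
def pvLeetDict : PySem.Dict Char Char :=
  PySem.Dict.ofList [('0','o'), ('1','i'), ('3','e'), ('4','a'), ('5','s'),
                     ('7','t'), ('8','b'), ('9','g'), ('@','a'), ('$','s')]

-- one iteration of Source B's loop body; state = (out, pending).
-- `ch in "_-."` for the single character ch is the explicit three-way comparison.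
def pvStepB (s : List Char × Bool) (ch : Char) : List Char × Bool :=
  if ch == '_' || ch == '-' || ch == '.' then s
  else
    let ch := pvLeetDict.getD ch ch
    if PySem.Chars.isspace ch then (s.1, true)
    else ((if s.2 && !s.1.isEmpty then s.1 ++ [' '] else s.1) ++ [ch], false)

def normalize_evasion_py_alt (text : String) : String :=
  String.ofList (((PySem.Str.lower text).toList.foldl pvStepB ([], false)).1)

-- ===== PRECONDITION & SPEC =====
def Spec_normalize_evasion_py (text : String) (out : String) : Prop := out = normalize_evasion_py_alt text
instance (text : String) (out : String) : Decidable (Spec_normalize_evasion_py text out) := by unfold Spec_normalize_evasion_py; infer_instance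

-- ===== CLAIM (what is proved, stated in full; the proofs are below) =====
def Claim_equal_normalize_evasion_py : Prop := ∀ (text : String), Dom_normalize_evasion_py text → Spec_normalize_evasion_py text (normalize_evasion_py text)

-- ===== LEMMAS AND PROOFS =====

-- the combined per-character effect of A's thirteen replace passes (proof artefact)
def pvEvasionTr (c : Char) : Option Char :=
  if c == '0' then some 'o'
  else if c == '1' then some 'i'
  else if c == '3' then some 'e'
  else if c == '4' then some 'a'
  else if c == '5' then some 's'
  else if c == '7' then some 't'
  else if c == '8' then some 'b'
  else if c == '9' then some 'g'
  else if c == '@' then some 'a'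
  else if c == '$' then some 's'
  else if c == '_' then none
  else if c == '-' then none
  else if c == '.' then none
  else some c

-- replace with a single-char pattern is a per-character flatMap
lemma replace_go_single (a : Char) (nw : List Char) :
    ∀ (l : List Char) (fuel : Nat) (acc : List Char), l.length ≤ fuel →
      PySem.Chars.replace.go [a] nw fuel l acc
        = acc.reverse ++ l.flatMap (fun c => if c == a then nw else [c]) := by
  intro l
  induction l with
  | nil => intro fuel acc _; cases fuel <;> simp [PySem.Chars.replace.go]
  | cons c t ih =>
    intro fuel acc h
    cases fuel with
    | zero => simp at h
    | succ fuel =>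
      simp only [PySem.Chars.replace.go]
      by_cases hc : c = a
      · subst hc
        have : [c].isPrefixOf (c :: t) = true := by simp [List.isPrefixOf]
        simp only [this, if_pos]
        simp only [List.length_cons, List.length_nil, List.drop_succ_cons, List.drop_zero]
        rw [ih fuel _ (by simpa using h)]
        simp
      · have : [a].isPrefixOf (c :: t) = false := by
          simp [List.isPrefixOf]; exact fun h' => hc h'.symm
        simp only [this]
        rw [ih fuel _ (by simpa using h)]
        simp [hc]

lemma replace_single (cs : List Char) (a : Char) (nw : List Char) :
    PySem.Chars.replace cs [a] nw = cs.flatMap (fun c => if c == a then nw else [c]) := by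
  simp [PySem.Chars.replace, replace_go_single a nw cs cs.length [] (le_refl _)]

-- a single-char replace acting on a filterMap is a filterMap with an updated table
lemma replace_filterMap (cs : List Char) (f : Char → Option Char) (a b : Char) :
    PySem.Chars.replace (cs.filterMap f) [a] [b]
      = cs.filterMap (fun c => (f c).map (fun x => if x == a then b else x)) := by
  rw [replace_single]
  induction cs with
  | nil => simp
  | cons c t ih =>
    simp only [beq_iff_eq] at ih
    cases hf : f c with
    | none => simpa [List.filterMap_cons, hf] using ih
    | some x => by_cases hx : x = a <;> simp [hf, hx, ih]

-- a single-char deletion acting on a filterMap is a filterMap with an updated table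
lemma delete_filterMap (cs : List Char) (f : Char → Option Char) (a : Char) :
    PySem.Chars.replace (cs.filterMap f) [a] []
      = cs.filterMap (fun c => (f c).bind (fun x => if x == a then none else some x)) := by
  rw [replace_single]
  induction cs with
  | nil => simp
  | cons c t ih =>
    simp only [beq_iff_eq] at ih
    cases hf : f c with
    | none => simpa [List.filterMap_cons, hf] using ih
    | some x => by_cases hx : x = a <;> simp [hf, hx, ih]

set_option maxHeartbeats 2000000 in
-- the composed thirteen replaces act per character exactly as the table
lemma chain_eq (cs : List Char) :
    PySem.Chars.replace (PySem.Chars.replace (PySem.Chars.replace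
      (PySem.Chars.replace (PySem.Chars.replace (PySem.Chars.replace
        (PySem.Chars.replace (PySem.Chars.replace (PySem.Chars.replace
          (PySem.Chars.replace (PySem.Chars.replace (PySem.Chars.replace
            (PySem.Chars.replace cs ['0'] ['o']) ['1'] ['i']) ['3'] ['e'])
            ['4'] ['a']) ['5'] ['s']) ['7'] ['t']) ['8'] ['b']) ['9'] ['g'])
            ['@'] ['a']) ['$'] ['s']) ['_'] []) ['-'] []) ['.'] []
      = cs.filterMap pvEvasionTr := by
  conv_lhs => rw [show cs = cs.filterMap some from List.filterMap_some.symm]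
  rw [replace_filterMap, replace_filterMap, replace_filterMap, replace_filterMap,
      replace_filterMap, replace_filterMap, replace_filterMap, replace_filterMap,
      replace_filterMap, replace_filterMap, delete_filterMap, delete_filterMap,
      delete_filterMap]
  apply List.filterMap_congr
  intro c _
  by_cases h0 : c = '0'
  · subst h0; decide
  by_cases h1 : c = '1'
  · subst h1; decide
  by_cases h2 : c = '3'
  · subst h2; decide
  by_cases h3 : c = '4'
  · subst h3; decide
  by_cases h4 : c = '5'
  · subst h4; decide
  by_cases h5 : c = '7'
  · subst h5; decide
  by_cases h6 : c = '8'
  · subst h6; decide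
  by_cases h7 : c = '9'
  · subst h7; decide
  by_cases h8 : c = '@'
  · subst h8; decide
  by_cases h9 : c = '$'
  · subst h9; decide
  by_cases h10 : c = '_'
  · subst h10; decide
  by_cases h11 : c = '-'
  · subst h11; decide
  by_cases h12 : c = '.'
  · subst h12; decide
  simp [pvEvasionTr, h0, h1, h2, h3, h4, h5, h6, h7, h8, h9, h10, h11, h12]

-- the state machine step applied to the already-translated character
def pvStepC (s : List Char × Bool) (d : Char) : List Char × Bool :=
  if PySem.Chars.isspace d then (s.1, true)
  else ((if s.2 && !s.1.isEmpty then s.1 ++ [' '] else s.1) ++ [d], false)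

set_option maxHeartbeats 2000000 in
-- Source B's loop body = separator/leet translation, then the pure whitespace machine
lemma stepB_eq (s : List Char × Bool) (c : Char) :
    pvStepB s c = match pvEvasionTr c with
      | none => s
      | some d => pvStepC s d := by
  by_cases h0 : c = '0'
  · subst h0; rfl
  by_cases h1 : c = '1'
  · subst h1; rfl
  by_cases h2 : c = '3'
  · subst h2; rfl
  by_cases h3 : c = '4'
  · subst h3; rfl
  by_cases h4 : c = '5'
  · subst h4; rfl
  by_cases h5 : c = '7'
  · subst h5; rfl
  by_cases h6 : c = '8'
  · subst h6; rfl
  by_cases h7 : c = '9'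
  · subst h7; rfl
  by_cases h8 : c = '@'
  · subst h8; rfl
  by_cases h9 : c = '$'
  · subst h9; rfl
  by_cases h10 : c = '_'
  · subst h10; rfl
  by_cases h11 : c = '-'
  · subst h11; rfl
  by_cases h12 : c = '.'
  · subst h12; rfl
  have hget : pvLeetDict.getD c c = c := by
    have hd : pvLeetDict = (((((((((PySem.Dict.empty.insert '0' 'o').insert '1' 'i').insert
        '3' 'e').insert '4' 'a').insert '5' 's').insert '7' 't').insert '8' 'b').insert
        '9' 'g').insert '@' 'a').insert '$' 's' := by decide
    rw [hd, PySem.Dict.getD_insert, PySem.Dict.getD_insert, PySem.Dict.getD_insert,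
        PySem.Dict.getD_insert, PySem.Dict.getD_insert, PySem.Dict.getD_insert,
        PySem.Dict.getD_insert, PySem.Dict.getD_insert, PySem.Dict.getD_insert,
        PySem.Dict.getD_insert, if_neg h9, if_neg h8, if_neg h7, if_neg h6, if_neg h5,
        if_neg h4, if_neg h3, if_neg h2, if_neg h1, if_neg h0]
    simp [PySem.Dict.empty, PySem.Dict.getD, PySem.Dict.get?]
  simp [pvStepB, pvStepC, pvEvasionTr, h0, h1, h2, h3, h4, h5, h6, h7, h8, h9, h10, h11, h12, hget]

lemma foldB_eq (ls : List Char) : ∀ s : List Char × Bool,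
    ls.foldl pvStepB s = (ls.filterMap pvEvasionTr).foldl pvStepC s := by
  induction ls with
  | nil => intro s; rfl
  | cons c t ih =>
    intro s
    rw [List.foldl_cons, List.filterMap_cons, stepB_eq]
    cases pvEvasionTr c <;> simp [ih]

-- the output the machine carries, as a function of split₀.go's state
def pvOut (acc : List (List Char)) (cur : List Char) : List Char :=
  List.intercalate [' '] acc.reverse ++
    (if cur = [] then [] else (if acc = [] then [] else [' ']) ++ cur.reverse)

lemma inter_cons2 (x y : List Char) (t : List (List Char)) :
    List.intercalate [' '] (x :: y :: t) = x ++ [' '] ++ List.intercalate [' '] (y :: t) := by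
  simp [List.intercalate, List.intersperse]

lemma inter_append (l : List (List Char)) (w : List Char) :
    List.intercalate [' '] (l ++ [w])
      = if l = [] then w else List.intercalate [' '] l ++ ' ' :: w := by
  induction l with
  | nil => simp [List.intercalate]
  | cons x t ih =>
    rcases t with _ | ⟨y, t'⟩
    · simp [inter_cons2, List.intercalate]
    · simp only [List.cons_append] at ih ⊢
      rw [inter_cons2, inter_cons2, ih]
      simp

lemma inter_ne_nil (l : List (List Char)) (hl : l ≠ []) (hw : [] ∉ l) :
    List.intercalate [' '] l ≠ [] := by
  rcases l with _ | ⟨x, t⟩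
  · exact absurd rfl hl
  · have hx : x ≠ [] := by intro h; exact hw (by simp [h])
    rcases t with _ | ⟨y, t'⟩
    · simpa [List.intercalate] using hx
    · rw [inter_cons2]
      simp [hx]

-- pushing the finished current word into acc does not change the carried output
lemma pvOut_push (acc : List (List Char)) (cur : List Char) (h : cur ≠ []) :
    pvOut acc cur = pvOut (cur.reverse :: acc) [] := by
  simp only [pvOut, if_neg h, if_pos rfl, List.reverse_cons, inter_append, List.append_nil]
  rcases acc with _ | ⟨w, u⟩
  · simp [List.intercalate]
  · simp

lemma core (ms : List Char) : ∀ (cur : List Char) (acc : List (List Char)) (pend : Bool),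
    [] ∉ acc →
    (cur ≠ [] → pend = false) →
    (cur = [] → acc ≠ [] → pend = true) →
    (ms.foldl pvStepC (pvOut acc cur, pend)).1
      = PySem.Chars.join [' '] (PySem.Chars.split₀.go ms cur acc) := by
  induction ms with
  | nil =>
    intro cur acc pend hw _ _
    rcases h : cur with _ | ⟨c, t⟩
    · simp [PySem.Chars.split₀.go, PySem.Chars.join, pvOut]
    · rw [← h]
      have hcur : cur ≠ [] := by simp [h]
      simp only [List.foldl_nil, PySem.Chars.split₀.go, PySem.Chars.join]
      rw [if_neg (by simp [h]), pvOut_push acc cur hcur]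
      simp [pvOut]
  | cons c rest ih =>
    intro cur acc pend hw hp1 hp2
    rw [List.foldl_cons]
    simp only [PySem.Chars.split₀.go]
    by_cases hs : PySem.Chars.isspace c = true
    · rw [if_pos hs]
      have step : pvStepC (pvOut acc cur, pend) c = (pvOut acc cur, true) := by
        simp [pvStepC, hs]
      rw [step]
      rcases hc : cur with _ | ⟨x, t⟩
      · simp only [List.isEmpty_nil, if_pos rfl]
        exact ih [] acc true hw (by simp) (by intros; rfl)
      · rw [← hc]
        have hcur : cur ≠ [] := by simp [hc]
        rw [if_neg (by simp [hc])]
        rw [pvOut_push acc cur hcur]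
        exact ih [] (cur.reverse :: acc) true
          (by simp [hc]; exact fun h => hw h) (by simp) (by intros; rfl)
    · rw [if_neg hs]
      have hnext := ih (c :: cur) acc false hw (by intro; rfl) (by simp)
      have step : pvStepC (pvOut acc cur, pend) c = (pvOut acc (c :: cur), false) := by
        simp only [pvStepC, hs, if_neg (by simp [hs] : ¬ PySem.Chars.isspace c = true)]
        congr 1
        rcases hc : cur with _ | ⟨x, t⟩
        · rcases ha : acc with _ | ⟨w, u⟩
          · simp [pvOut, List.intercalate]
          · have hpend : pend = true := hp2 hc (by simp [ha])
            have hw' : [] ∉ (w :: u) := ha ▸ hw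
            have hne : pvOut (w :: u) [] ≠ [] := by
              have hpv : pvOut (w :: u) [] = List.intercalate [' '] (w :: u).reverse := by
                simp [pvOut]
              rw [hpv]
              exact inter_ne_nil _ (by simp) (by simpa [and_comm] using hw')
            have hb : (!(pvOut (w :: u) []).isEmpty) = true := by
              rcases hpv : pvOut (w :: u) [] with _ | ⟨a, l⟩
              · exact absurd hpv hne
              · rfl
            rw [hpend, Bool.true_and, hb, if_pos rfl]
            simp [pvOut, List.append_assoc]
        · have hpend : pend = false := hp1 (by simp [hc])
          rw [hpend]
          simp [pvOut, hc, List.append_assoc]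
      rw [step]
      exact hnext

-- ===== VERDICT (by name: the statement is the Claim_ definition above) =====
theorem normalize_evasion_py_spec : Claim_equal_normalize_evasion_py := by
  intro text _
  show normalize_evasion_py text = normalize_evasion_py_alt text
  unfold normalize_evasion_py normalize_evasion_py_alt
  simp only [PySem.Str.replace, PySem.Str.lower, String.toList_ofList]
  rw [show ("0" : String).toList = ['0'] from rfl, show ("o" : String).toList = ['o'] from rfl,
      show ("1" : String).toList = ['1'] from rfl, show ("i" : String).toList = ['i'] from rfl,
      show ("3" : String).toList = ['3'] from rfl, show ("e" : String).toList = ['e'] from rfl,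
      show ("4" : String).toList = ['4'] from rfl, show ("a" : String).toList = ['a'] from rfl,
      show ("5" : String).toList = ['5'] from rfl, show ("s" : String).toList = ['s'] from rfl,
      show ("7" : String).toList = ['7'] from rfl, show ("t" : String).toList = ['t'] from rfl,
      show ("8" : String).toList = ['8'] from rfl, show ("b" : String).toList = ['b'] from rfl,
      show ("9" : String).toList = ['9'] from rfl, show ("g" : String).toList = ['g'] from rfl,
      show ("@" : String).toList = ['@'] from rfl, show ("$" : String).toList = ['$'] from rfl,
      show ("_" : String).toList = ['_'] from rfl, show ("-" : String).toList = ['-'] from rfl,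
      show ("." : String).toList = ['.'] from rfl, show ("" : String).toList = [] from rfl]
  rw [chain_eq, foldB_eq]
  rw [show (([], false) : List Char × Bool) = (pvOut [] [], false) from by
        simp [pvOut, List.intercalate]]
  rw [core (List.filterMap pvEvasionTr (PySem.Chars.lower text.toList))
        [] [] false (by simp) (by simp) (by simp)]
  simp [PySem.Str.join, PySem.Str.split₀, PySem.Chars.split₀, PySem.Chars.join,
        Function.comp_def, String.toList_ofList, List.map_id']
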